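-- pv_equiv track=rewrite | github.com/xubocheng/MetaEvo | from_seq_to_library.py | generate_all_variations
-- ===== SOURCE A (Python) =====
-- def generate_all_variations(input_string):
--     # 定义字符映射
--     character_mapping = {
--         'A': ['K', 'R', 'H'],
--         'B': ['A', 'I', 'L', 'V'],
--         'C': ['F', 'W', 'Y'],
--         'D': ['N', 'Q', 'S', 'T']
--     }
--     all_variations = ['']
--
--     for char in input_string:
--         if char in character_mapping:
--             new_variations = []
--             for mapped_char in character_mapping[char]:
--                 for variation in all_variations:
--                     new_variations.append(variation + mapped_char)
--
--             all_variations = new_variations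
--
--     return all_variations
-- ===== SOURCE B (Python) =====
-- def generate_all_variations(input_string):
--     character_mapping = {
--         'A': ['K', 'R', 'H'],
--         'B': ['A', 'I', 'L', 'V'],
--         'C': ['F', 'W', 'Y'],
--         'D': ['N', 'Q', 'S', 'T']
--     }
--     # Mixed-radix enumeration: the k-th result is decoded directly from its index,
--     # with the substitution list of the earliest character as the least-significant digit.
--     lists = [character_mapping[c] for c in input_string if c in character_mapping]
--     total = 1
--     for l in lists:
--         total *= len(l)
--     results = []
--     for i in range(total):
--         chars = []
--         q = i
--         for l in lists:
--             chars.append(l[q % len(l)])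
--             q //= len(l)
--         results.append(''.join(chars))
--     return results
-- ===== Notes on version B (the rewrite author's own statement) =====
-- stated objective: alternative
-- what changed: A's incremental fold that rebuilds the whole variation list at every mapped character is replaced by direct mixed-radix index decoding: compute the total count once and decode each output string straight from its index (earliest character = least-significant digit), with no intermediate variation lists.
import Mathlib
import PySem

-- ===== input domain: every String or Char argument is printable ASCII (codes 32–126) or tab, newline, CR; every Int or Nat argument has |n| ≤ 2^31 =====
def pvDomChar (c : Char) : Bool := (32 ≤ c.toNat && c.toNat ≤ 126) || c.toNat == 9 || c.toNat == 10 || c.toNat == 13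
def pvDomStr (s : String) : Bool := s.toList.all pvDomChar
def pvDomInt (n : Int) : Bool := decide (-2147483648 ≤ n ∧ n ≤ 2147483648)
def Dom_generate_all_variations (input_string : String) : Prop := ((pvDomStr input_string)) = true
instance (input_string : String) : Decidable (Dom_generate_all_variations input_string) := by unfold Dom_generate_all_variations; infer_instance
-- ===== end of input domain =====

-- B replaces A's incremental rebuild of the whole variation list per mapped character
-- by mixed-radix index decoding: each output string is computed directly from its index
-- (objective: alternative; same output, no intermediate variation lists).
-- Strings are handled as char lists internally (String.ofList at the boundary), which is exact.

-- ===== PORT A =====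
def character_mapping : List (Char × List Char) :=
  [('A', ['K','R','H']), ('B', ['A','I','L','V']), ('C', ['F','W','Y']), ('D', ['N','Q','S','T'])]

def generate_all_variations (input_string : String) : List String :=
  (input_string.toList.foldl (fun all c =>
      match character_mapping.lookup c with
      | none => all
      | some ms =>
          -- new_variations = []; for mapped_char in ms: for variation in all: append
          ms.foldl (fun nv m => all.foldl (fun nv2 v => nv2 ++ [v ++ [m]]) nv) []
    ) ([[]] : List (List Char))).map String.ofList

-- ===== PORT B =====
-- inner loop of Source B: decode index i over the substitution lists, least-significant first
def decodeVar : List (List Char) → Nat → List Char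
  | [], _ => []
  | l :: ls, i => l.getD (i % l.length) ' ' :: decodeVar ls (i / l.length)

def generate_all_variations_alt (input_string : String) : List String :=
  let lists := input_string.toList.filterMap (fun c => character_mapping.lookup c)
  let total := lists.foldl (fun a l => a * l.length) 1
  (List.range total).map (fun i => String.ofList (decodeVar lists i))

-- ===== PRECONDITION & SPEC =====
def Spec_generate_all_variations (input_string : String) (out : List String) : Prop := out = generate_all_variations_alt input_string
instance (input_string : String) (out : List String) : Decidable (Spec_generate_all_variations input_string out) := by unfold Spec_generate_all_variations; infer_instance

-- ===== CLAIM (what is proved, stated in full; the proofs are below) =====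
def Claim_equal_generate_all_variations : Prop := ∀ (input_string : String), Dom_generate_all_variations input_string → Spec_generate_all_variations input_string (generate_all_variations input_string)

-- ===== LEMMAS AND PROOFS =====

def prodLens (ls : List (List Char)) : Nat := ls.foldl (fun a l => a * l.length) 1

lemma foldl_mul (ls : List (List Char)) (a : Nat) :
    ls.foldl (fun a l => a * l.length) a = a * prodLens ls := by
  induction ls generalizing a with
  | nil => simp [prodLens]
  | cons l rest ih =>
      simp only [prodLens, List.foldl_cons]
      rw [ih, ih]
      ring

lemma prodLens_cons (l : List Char) (ls : List (List Char)) :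
    prodLens (l :: ls) = l.length * prodLens ls := by
  simp only [prodLens, List.foldl_cons]
  rw [foldl_mul, Nat.one_mul]
  rfl

lemma prodLens_snoc (ls : List (List Char)) (l : List Char) :
    prodLens (ls ++ [l]) = prodLens ls * l.length := by
  simp only [prodLens, List.foldl_append, List.foldl_cons, List.foldl_nil]

-- every substitution list is nonempty
lemma lookup_ne_nil (c : Char) (l : List Char) (h : character_mapping.lookup c = some l) : l ≠ [] := by
  simp only [character_mapping, List.lookup] at h
  repeat' split at h
  all_goals (intro he; subst he; simp at h)

-- A's inner Python loop: appending one element at a time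
lemma inner_foldl (all : List (List Char)) (m : Char) (nv : List (List Char)) :
    all.foldl (fun nv2 v => nv2 ++ [v ++ [m]]) nv = nv ++ all.map (fun v => v ++ [m]) := by
  induction all generalizing nv with
  | nil => simp
  | cons v rest ih => simp [List.foldl_cons, ih]

-- the whole per-character step is a flatMap
lemma step_eq (all : List (List Char)) (ms : List Char) :
    ms.foldl (fun nv m => all.foldl (fun nv2 v => nv2 ++ [v ++ [m]]) nv) [] =
      ms.flatMap (fun m => all.map (fun v => v ++ [m])) := by
  suffices h : ∀ nv, ms.foldl (fun nv m => all.foldl (fun nv2 v => nv2 ++ [v ++ [m]]) nv) nv =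
      nv ++ ms.flatMap (fun m => all.map (fun v => v ++ [m])) by simpa using h []
  induction ms with
  | nil => simp
  | cons m rest ih =>
      intro nv
      rw [List.foldl_cons, inner_foldl, ih]
      simp [List.append_assoc]

-- A's char fold only looks at mapped characters
lemma char_fold_filterMap (cs : List Char) (acc : List (List Char)) :
    cs.foldl (fun all c =>
        match character_mapping.lookup c with
        | none => all
        | some ms =>
            ms.foldl (fun nv m => all.foldl (fun nv2 v => nv2 ++ [v ++ [m]]) nv) []) acc =
      (cs.filterMap (fun c => character_mapping.lookup c)).foldl (fun all ms =>
        ms.foldl (fun nv m => all.foldl (fun nv2 v => nv2 ++ [v ++ [m]]) nv) []) acc := by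
  induction cs generalizing acc with
  | nil => rfl
  | cons c rest ih =>
      cases h : character_mapping.lookup c with
      | none => simp only [List.foldl_cons, List.filterMap_cons, h]; exact ih _
      | some ms => simp only [List.foldl_cons, List.filterMap_cons, h]; exact ih _

-- decoding depends only on the index modulo the radix product
lemma decodeVar_mod (ls : List (List Char)) (i : Nat) :
    decodeVar ls (i % prodLens ls) = decodeVar ls i := by
  induction ls generalizing i with
  | nil => rfl
  | cons l rest ih =>
      simp only [decodeVar, prodLens_cons]
      rw [Nat.mod_mod_of_dvd _ ⟨prodLens rest, rfl⟩, Nat.mod_mul_right_div_self, ih]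

-- decoding a snoc: the appended list is the most-significant digit
lemma decodeVar_snoc (ls : List (List Char)) (l : List Char) (i : Nat) :
    decodeVar (ls ++ [l]) i = decodeVar ls i ++ [l.getD ((i / prodLens ls) % l.length) ' '] := by
  induction ls generalizing i with
  | nil => simp [decodeVar, prodLens]
  | cons l0 rest ih =>
      simp only [List.cons_append, decodeVar, ih, prodLens_cons, List.cons_append]
      rw [Nat.div_div_eq_div_mul]

-- prodLens of nonempty lists is positive
lemma prodLens_pos (ls : List (List Char)) (hne : ∀ l ∈ ls, l ≠ []) : 0 < prodLens ls := by
  induction ls with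
  | nil => simp [prodLens]
  | cons a rest ih =>
      rw [prodLens_cons]
      exact Nat.mul_pos (List.length_pos_iff.mpr (hne a (by simp)))
        (ih (fun x hx => hne x (by simp [hx])))

-- enumerating a range of a product, blockwise
lemma range_mul_flatMap (P n : Nat) :
    List.range (P * n) = (List.range n).flatMap (fun j => (List.range P).map (fun r => P * j + r)) := by
  induction n with
  | zero => simp
  | succ n ih =>
      rw [Nat.mul_succ, List.range_add, ih, List.range_succ]
      simp

lemma list_eq_range_getD (l : List Char) :
    l = (List.range l.length).map (fun j => l.getD j ' ') := by
  apply List.ext_getElem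
  · simp
  · intro i h1 h2
    simp only [List.getElem_map, List.getElem_range]
    rw [List.getD_eq_getElem l ' ' h1]

-- main bridge: A's fold over the substitution lists is B's range-decode
lemma fold_eq_decode (ls : List (List Char)) (hne : ∀ l ∈ ls, l ≠ []) :
    ls.foldl (fun all ms =>
        ms.foldl (fun nv m => all.foldl (fun nv2 v => nv2 ++ [v ++ [m]]) nv) [])
      ([[]] : List (List Char)) =
      (List.range (prodLens ls)).map (decodeVar ls) := by
  induction ls using List.reverseRecOn with
  | nil => simp [prodLens, decodeVar, List.range_succ]
  | append_singleton ls l ih =>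
      have hne' : ∀ x ∈ ls, x ≠ [] := fun x hx => hne x (List.mem_append_left _ hx)
      have hP : 0 < prodLens ls := prodLens_pos ls hne'
      rw [List.foldl_append, List.foldl_cons, List.foldl_nil, step_eq, ih hne',
          prodLens_snoc, range_mul_flatMap]
      conv_lhs => rw [list_eq_range_getD l]
      rw [List.flatMap_map, List.map_flatMap]
      refine List.flatMap_congr (fun j hj => ?_)
      rw [List.map_map, List.map_map]
      refine List.map_congr_left (fun r hr => ?_)
      simp only [Function.comp]
      rw [decodeVar_snoc]
      have hrP : r < prodLens ls := List.mem_range.mp hr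
      have h1 : (prodLens ls * j + r) / prodLens ls = j := by
        rw [Nat.mul_add_div hP, Nat.div_eq_of_lt hrP, Nat.add_zero]
      have h2 : decodeVar ls (prodLens ls * j + r) = decodeVar ls r := by
        rw [← decodeVar_mod, Nat.mul_add_mod, Nat.mod_eq_of_lt hrP]
      rw [h1, h2, Nat.mod_eq_of_lt (List.mem_range.mp hj)]

-- ===== VERDICT (by name: the statement is the Claim_ definition above) =====
theorem generate_all_variations_spec : Claim_equal_generate_all_variations := by
  intro s _
  show _ = _
  unfold generate_all_variations generate_all_variations_alt
  rw [char_fold_filterMap, fold_eq_decode]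
  · simp only [List.map_map]
    rfl
  · intro l hl
    obtain ⟨c, _, hc⟩ := List.mem_filterMap.mp hl
    exact lookup_ne_nil c l hc
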